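-- pv_equiv track=rewrite | github.com/BennyJane/algorithm_mad | leetcode/match/No274/Q.py | asteroidsDestroyed
-- ===== SOURCE A (Python) =====
-- from typing import List
--
-- def asteroidsDestroyed(mass: int, asteroids: List[int]) -> bool:
--     asteroids.sort()
--
--     for c in asteroids:
--         if mass >= c:
--             mass += c
--         else:
--             return False
--
--     return True
-- ===== SOURCE B (Python) =====
-- def asteroidsDestroyed(mass, asteroids):
--     asteroids.sort()
--     total = 0
--     prefix = [0]
--     for a in asteroids:
--         total += a
--         prefix.append(total)
--     return all(mass + prefix[i] >= asteroids[i] for i in range(len(asteroids)))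
-- ===== Notes on version B (the rewrite author's own statement) =====
-- stated objective: alternative
-- what changed: Replaces the fused greedy scan with early return by a two-phase shape: build a prefix-sum table of the sorted masses, then a single all(...) check that mass plus the sum of all smaller asteroids covers each asteroid.
import Mathlib
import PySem

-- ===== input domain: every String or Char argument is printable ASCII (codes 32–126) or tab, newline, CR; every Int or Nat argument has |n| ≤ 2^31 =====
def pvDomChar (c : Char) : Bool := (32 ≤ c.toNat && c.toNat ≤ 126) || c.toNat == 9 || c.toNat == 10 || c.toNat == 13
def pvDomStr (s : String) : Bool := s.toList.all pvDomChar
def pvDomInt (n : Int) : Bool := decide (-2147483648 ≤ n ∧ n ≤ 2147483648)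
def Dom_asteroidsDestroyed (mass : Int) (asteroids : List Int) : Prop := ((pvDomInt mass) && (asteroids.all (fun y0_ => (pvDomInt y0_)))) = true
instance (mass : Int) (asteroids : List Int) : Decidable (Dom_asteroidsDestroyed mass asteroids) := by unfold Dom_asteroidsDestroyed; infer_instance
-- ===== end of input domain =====

-- B replaces A's fused greedy scan (early return) by a two-phase prefix-sum table + all(...) check;
-- A sorts its list argument in place (B does the same), the equivalence proved is about the return value.

-- ===== PORT A =====
-- the 'for c in asteroids: …' loop with its early 'return False'
def asteroidsDestroyedLoop (mass : Int) : List Int → Bool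
  | [] => true
  | c :: t => if mass ≥ c then asteroidsDestroyedLoop (mass + c) t else false

def asteroidsDestroyed (mass : Int) (asteroids : List Int) : Bool :=
  asteroidsDestroyedLoop mass (PySem.List.sorted asteroids (fun x => x) false)

-- ===== PORT B =====
-- 'total = 0; prefix = [0]; for a in asteroids: total += a; prefix.append(total)'
def buildPrefix (asteroids : List Int) : Int × List Int :=
  asteroids.foldl (fun (p : Int × List Int) a => (p.1 + a, p.2 ++ [p.1 + a])) (0, [0])

def asteroidsDestroyed_alt (mass : Int) (asteroids : List Int) : Bool :=
  let s := PySem.List.sorted asteroids (fun x => x) false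
  let pref := (buildPrefix s).2
  (List.range s.length).all (fun i => decide (mass + pref.getD i 0 ≥ s.getD i 0))

-- ===== PRECONDITION & SPEC =====
def Spec_asteroidsDestroyed (mass : Int) (asteroids : List Int) (out : Bool) : Prop := out = asteroidsDestroyed_alt mass asteroids
instance (mass : Int) (asteroids : List Int) (out : Bool) : Decidable (Spec_asteroidsDestroyed mass asteroids out) := by unfold Spec_asteroidsDestroyed; infer_instance

-- ===== CLAIM (what is proved, stated in full; the proofs are below) =====
def Claim_equal_asteroidsDestroyed : Prop := ∀ (mass : Int) (asteroids : List Int), Dom_asteroidsDestroyed mass asteroids → Spec_asteroidsDestroyed mass asteroids (asteroidsDestroyed mass asteroids)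

-- ===== LEMMAS AND PROOFS =====

-- A's greedy loop succeeds iff mass plus the sum of the elements before index i covers element i, for all i.
theorem loop_eq_all (l : List Int) : ∀ (mass : Int),
    asteroidsDestroyedLoop mass l =
      (List.range l.length).all (fun i => decide (mass + (l.take i).sum ≥ l.getD i 0)) := by
  induction l with
  | nil => intro mass; simp [asteroidsDestroyedLoop]
  | cons c t ih =>
    intro mass
    rw [asteroidsDestroyedLoop]
    simp only [List.length_cons, List.range_succ_eq_map, List.all_cons, List.all_map]
    by_cases h : mass ≥ c
    · simp only [if_pos h]
      rw [ih (mass + c)]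
      have : (List.range t.length).all
          (fun i => decide (mass + c + (t.take i).sum ≥ t.getD i 0)) =
          (List.range t.length).all
          ((fun i => decide (mass + ((c :: t).take i).sum ≥ (c :: t).getD i 0)) ∘ (· + 1)) :=
        List.all_congr rfl (fun i => by simp [List.take_succ_cons, add_assoc])
      rw [this]
      simp [h]
    · simp [h]

-- B's prefix table, generalized over the fold's start state.
theorem buildPrefix_snd_go (l : List Int) : ∀ (t0 : Int) (pre : List Int),
    (l.foldl (fun (p : Int × List Int) a => (p.1 + a, p.2 ++ [p.1 + a])) (t0, pre)).2 =
      pre ++ (List.range l.length).map (fun i => t0 + (l.take (i + 1)).sum) := by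
  induction l with
  | nil => intro t0 pre; simp
  | cons a t ih =>
    intro t0 pre
    simp only [List.foldl_cons]
    rw [ih (t0 + a) (pre ++ [t0 + a])]
    simp only [List.length_cons, List.range_succ_eq_map, List.map_cons, List.map_map,
      List.append_assoc, List.singleton_append]
    congr 2
    · simp
    · apply List.map_congr_left
      intro i _
      simp [List.take_succ_cons, add_assoc]

-- congruence for 'all' over a range where the predicates agree below the bound
theorem all_range_congr (p q : Nat → Bool) : ∀ (n : Nat), (∀ i < n, p i = q i) →
    (List.range n).all p = (List.range n).all q := by
  intro n
  induction n with
  | zero => intro _; rfl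
  | succ m ih =>
    intro h
    rw [List.range_succ, List.all_append, List.all_append,
      ih (fun i hi => h i (Nat.lt_succ_of_lt hi))]
    simp [h m (Nat.lt_succ_self m)]

-- the entry of B's prefix table at a valid index is the sum of the first i elements
theorem buildPrefix_getD (l : List Int) (i : Nat) (hi : i < l.length) :
    (buildPrefix l).2.getD i 0 = (l.take i).sum := by
  unfold buildPrefix
  rw [buildPrefix_snd_go l 0 [0]]
  cases i with
  | zero => simp
  | succ j =>
    have hj : j < l.length := Nat.lt_of_succ_lt hi
    simp [List.getD, List.getElem?_map, List.getElem?_range hj]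

-- ===== VERDICT (by name: the statement is the Claim_ definition above) =====
theorem asteroidsDestroyed_spec : Claim_equal_asteroidsDestroyed := by
  intro mass asteroids _
  unfold Spec_asteroidsDestroyed asteroidsDestroyed asteroidsDestroyed_alt
  rw [loop_eq_all]
  apply all_range_congr
  intro i hi
  rw [buildPrefix_getD _ i hi]
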